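-- pv_equiv track=rewrite | github.com/nameisczy/cs002_introduction-to-computer-programming | ChenZiyao_assign7/ChenZiyao_assign7_part4.py | string_adjustcase
-- ===== SOURCE A (Python) =====
-- def string_adjustcase(string1,string2):
--     new_string = ''
--     if string2 == 'upper':
--         for i in string1:
--             if 97 <= ord(i) <= 122:
--                 new_string = new_string + chr(ord(i)-32)
--             else:
--                 new_string = new_string + i
--     elif string2 == 'lower':
--         for i in string1:
--             if 65 <= ord(i) <= 90:
--                 new_string = new_string + chr(ord(i)+32)
--             else:
--                 new_string = new_string + i
--     else:
--         new_string = string1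
--     return new_string
-- ===== SOURCE B (Python) =====
-- _UP = str.maketrans('abcdefghijklmnopqrstuvwxyz', 'ABCDEFGHIJKLMNOPQRSTUVWXYZ')
-- _LOW = str.maketrans('ABCDEFGHIJKLMNOPQRSTUVWXYZ', 'abcdefghijklmnopqrstuvwxyz')
--
-- def string_adjustcase(string1, string2):
--     if string2 == 'upper':
--         return string1.translate(_UP)
--     if string2 == 'lower':
--         return string1.translate(_LOW)
--     return string1
-- ===== Notes on version B (the rewrite author's own statement) =====
-- stated objective: idiomatic
-- what changed: Replaces A's two per-character branching append loops by two translation tables built once with str.maketrans over the 26 ASCII letters and a single str.translate call per case.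
import Mathlib
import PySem

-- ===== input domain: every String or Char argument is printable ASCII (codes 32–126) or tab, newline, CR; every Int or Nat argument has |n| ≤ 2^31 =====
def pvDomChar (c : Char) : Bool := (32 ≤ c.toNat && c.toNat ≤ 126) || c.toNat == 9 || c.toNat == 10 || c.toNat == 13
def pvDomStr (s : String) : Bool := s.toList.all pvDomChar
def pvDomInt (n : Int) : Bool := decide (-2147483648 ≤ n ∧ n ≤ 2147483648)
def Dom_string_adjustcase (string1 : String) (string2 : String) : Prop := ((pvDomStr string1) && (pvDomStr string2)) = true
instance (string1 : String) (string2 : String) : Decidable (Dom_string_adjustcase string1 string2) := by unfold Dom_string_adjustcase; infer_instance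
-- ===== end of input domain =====

-- B replaces A's two per-character branching append loops by two translation tables built once
-- (str.maketrans over the 26 ASCII letters) and a single translate call per case (objective: idiomatic).

-- ===== PORT A =====
def string_adjustcase (string1 : String) (string2 : String) : String :=
  if string2 == "upper" then
    string1.toList.foldl (fun new_string i =>
      if 97 ≤ i.toNat ∧ i.toNat ≤ 122 then new_string ++ String.ofList [Char.ofNat (i.toNat - 32)]
      else new_string ++ String.ofList [i]) ""
  else if string2 == "lower" then
    string1.toList.foldl (fun new_string i =>
      if 65 ≤ i.toNat ∧ i.toNat ≤ 90 then new_string ++ String.ofList [Char.ofNat (i.toNat + 32)]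
      else new_string ++ String.ofList [i]) ""
  else string1

-- ===== PORT B =====
-- str.maketrans(s, t) = the dict pairing s's chars with t's chars, in order
def pvUpTable : PySem.Dict Char Char :=
  PySem.Dict.ofList ("abcdefghijklmnopqrstuvwxyz".toList.zip "ABCDEFGHIJKLMNOPQRSTUVWXYZ".toList)

def pvLowTable : PySem.Dict Char Char :=
  PySem.Dict.ofList ("ABCDEFGHIJKLMNOPQRSTUVWXYZ".toList.zip "abcdefghijklmnopqrstuvwxyz".toList)

-- s.translate(table): each char is replaced by its table image; chars absent from the table are kept
def pvTranslate (s : String) (t : PySem.Dict Char Char) : String :=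
  String.ofList (s.toList.map (fun c => t.getD c c))

def string_adjustcase_alt (string1 : String) (string2 : String) : String :=
  if string2 == "upper" then pvTranslate string1 pvUpTable
  else if string2 == "lower" then pvTranslate string1 pvLowTable
  else string1

-- ===== PRECONDITION & SPEC =====
def Spec_string_adjustcase (string1 : String) (string2 : String) (out : String) : Prop := out = string_adjustcase_alt string1 string2
instance (string1 : String) (string2 : String) (out : String) : Decidable (Spec_string_adjustcase string1 string2 out) := by unfold Spec_string_adjustcase; infer_instance

-- ===== CLAIM (what is proved, stated in full; the proofs are below) =====
def Claim_equal_string_adjustcase : Prop := ∀ (string1 : String) (string2 : String), Dom_string_adjustcase string1 string2 → Spec_string_adjustcase string1 string2 (string_adjustcase string1 string2)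

-- ===== LEMMAS AND PROOFS =====

-- A's append-accumulator loop builds the map of its per-character if-function
theorem foldl_if_append (P : Char → Prop) [DecidablePred P] (u : Char → Char)
    (l : List Char) (s : String) :
    l.foldl (fun ns i => if P i then ns ++ String.ofList [u i] else ns ++ String.ofList [i]) s
      = s ++ String.ofList (l.map (fun i => if P i then u i else i)) := by
  induction l generalizing s with
  | nil => apply String.ext; simp
  | cons c cs ih =>
      simp only [List.foldl_cons, List.map_cons]
      split_ifs with hc <;> rw [ih] <;> apply String.ext <;> simp

set_option maxRecDepth 10000 in
set_option maxHeartbeats 1000000 in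
theorem dom_getD_up (c : Char) (h : pvDomChar c = true) :
    pvUpTable.getD c c = if 97 ≤ c.toNat ∧ c.toNat ≤ 122 then Char.ofNat (c.toNat - 32) else c := by
  have hlt : c.toNat < 127 := by
    simp only [pvDomChar, Bool.or_eq_true, Bool.and_eq_true, decide_eq_true_eq, beq_iff_eq] at h
    omega
  have hall : ∀ n ∈ List.range 127,
      pvUpTable.getD (Char.ofNat n) (Char.ofNat n) =
        if 97 ≤ (Char.ofNat n).toNat ∧ (Char.ofNat n).toNat ≤ 122
        then Char.ofNat ((Char.ofNat n).toNat - 32) else Char.ofNat n := by decide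
  have := hall c.toNat (List.mem_range.mpr hlt)
  simpa [Char.ofNat_toNat] using this

set_option maxRecDepth 10000 in
set_option maxHeartbeats 1000000 in
theorem dom_getD_low (c : Char) (h : pvDomChar c = true) :
    pvLowTable.getD c c = if 65 ≤ c.toNat ∧ c.toNat ≤ 90 then Char.ofNat (c.toNat + 32) else c := by
  have hlt : c.toNat < 127 := by
    simp only [pvDomChar, Bool.or_eq_true, Bool.and_eq_true, decide_eq_true_eq, beq_iff_eq] at h
    omega
  have hall : ∀ n ∈ List.range 127,
      pvLowTable.getD (Char.ofNat n) (Char.ofNat n) =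
        if 65 ≤ (Char.ofNat n).toNat ∧ (Char.ofNat n).toNat ≤ 90
        then Char.ofNat ((Char.ofNat n).toNat + 32) else Char.ofNat n := by decide
  have := hall c.toNat (List.mem_range.mpr hlt)
  simpa [Char.ofNat_toNat] using this

-- ===== VERDICT (by name: the statement is the Claim_ definition above) =====
theorem string_adjustcase_spec : Claim_equal_string_adjustcase := by
  intro string1 string2 hdom
  unfold Spec_string_adjustcase string_adjustcase string_adjustcase_alt pvTranslate
  have hdom1 : ∀ c ∈ string1.toList, pvDomChar c = true := by
    simp only [Dom_string_adjustcase, Bool.and_eq_true, pvDomStr, List.all_eq_true] at hdom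
    exact hdom.1
  split_ifs with h1 h2
  · rw [foldl_if_append (fun i => 97 ≤ i.toNat ∧ i.toNat ≤ 122) (fun i => Char.ofNat (i.toNat - 32)),
      List.map_congr_left (fun c hc => (dom_getD_up c (hdom1 c hc)).symm)]
    apply String.ext; simp
  · rw [foldl_if_append (fun i => 65 ≤ i.toNat ∧ i.toNat ≤ 90) (fun i => Char.ofNat (i.toNat + 32)),
      List.map_congr_left (fun c hc => (dom_getD_low c (hdom1 c hc)).symm)]
    apply String.ext; simp
  · rfl
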